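-- pv_equiv track=rewrite | github.com/SawlStone/empireofcode | divide_fuel_rod.py | disjoint
-- ===== SOURCE A (Python) =====
-- def disjoint(number):
--     n = [(i ** 2 + i)//2 for i in range(1, 1000)]
--     for t in range(len(n)):
--         u = []
--         for e in n[t:]:
--             u.append(e)
--             if number == sum(u):
--                 return u
--     return []
-- ===== SOURCE B (Python) =====
-- def disjoint(number):
--     tri = [(i * i + i) // 2 for i in range(1, 1000)]
--     prefix = [0]
--     s = 0
--     for v in tri:
--         s += v
--         prefix.append(s)
--     idx = {p: j for j, p in enumerate(prefix)}
--     for t in range(len(tri)):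
--         j = idx.get(prefix[t] + number)
--         if j is not None:
--             return tri[t:j]
--     return []
-- ===== Notes on version B (the rewrite author's own statement) =====
-- stated objective: faster
-- what changed: Replaces the nested scan that re-sums every candidate window with a single prefix-sum array and a hash map from prefix value to index, so each start position is checked with one O(1) dict lookup.
import Mathlib
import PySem

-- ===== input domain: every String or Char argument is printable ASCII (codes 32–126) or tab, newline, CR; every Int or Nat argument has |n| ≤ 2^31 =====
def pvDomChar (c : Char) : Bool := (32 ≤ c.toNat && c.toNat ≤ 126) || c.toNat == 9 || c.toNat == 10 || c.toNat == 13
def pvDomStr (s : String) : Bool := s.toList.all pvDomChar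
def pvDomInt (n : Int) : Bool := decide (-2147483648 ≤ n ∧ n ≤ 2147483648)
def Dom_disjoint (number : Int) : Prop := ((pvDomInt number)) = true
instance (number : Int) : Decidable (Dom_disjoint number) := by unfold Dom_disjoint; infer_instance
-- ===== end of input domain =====

-- B replaces A's triple-nested rescanning of windows by one prefix-sum pass plus a
-- dict lookup per start position (objective: faster, asymptotic).

-- ===== PORT A =====
-- inner 'for e in n[t:]' loop: grow u, return the first u with number == sum(u)
def pvAInner (number : Int) (u : List Int) : List Int → Option (List Int)
  | [] => none
  | e :: es =>
    let u' := u ++ [e]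
    if number = u'.sum then some u' else pvAInner number u' es

-- outer 'for t in range(len(n))' loop, visiting the suffixes n[t:]
def pvAOuter (number : Int) : List Int → List Int
  | [] => []
  | e :: rest =>
    match pvAInner number [] (e :: rest) with
    | some u => u
    | none => pvAOuter number rest

def disjoint (number : Int) : List Int :=
  let n := (PySem.List.pyRange 1 1000 1).map (fun i => PySem.Int.floordiv (i ^ 2 + i) 2)
  pvAOuter number n

-- ===== PORT B =====
def pvTriB : List Int := (PySem.List.pyRange 1 1000 1).map (fun i => PySem.Int.floordiv (i * i + i) 2)

-- 'prefix = [0]; for v in tri: s += v; prefix.append(s)' (the list after the head 0)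
def pvPrefixGo (s : Int) : List Int → List Int
  | [] => []
  | v :: vs => (s + v) :: pvPrefixGo (s + v) vs

-- 'idx = {p: j for j, p in enumerate(prefix)}'
def pvIdx (pre : List Int) : PySem.Dict Int Int :=
  (PySem.List.enumerate pre 0).foldl (fun d jp => d.insert jp.2 jp.1) PySem.Dict.empty

-- 'for t in range(len(tri)): j = idx.get(prefix[t] + number); if j is not None: return tri[t:j]'
def pvBLoop (number : Int) (tri pre : List Int) (idx : PySem.Dict Int Int) : List Nat → List Int
  | [] => []
  | t :: ts =>
    match idx.get? (pre.getD t 0 + number) with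
    | some j => PySem.List.slice tri (some (t : Int)) (some j)
    | none => pvBLoop number tri pre idx ts

def disjoint_alt (number : Int) : List Int :=
  let tri := pvTriB
  let pre := 0 :: pvPrefixGo 0 tri
  pvBLoop number tri pre (pvIdx pre) (List.range tri.length)

-- ===== PRECONDITION & SPEC =====
def Spec_disjoint (number : Int) (out : List Int) : Prop := out = disjoint_alt number
instance (number : Int) (out : List Int) : Decidable (Spec_disjoint number out) := by unfold Spec_disjoint; infer_instance

-- ===== CLAIM (what is proved, stated in full; the proofs are below) =====
def Claim_equal_disjoint : Prop := ∀ (number : Int), Dom_disjoint number → Spec_disjoint number (disjoint number)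

-- ===== LEMMAS AND PROOFS =====

-- prefix sums of the first k elements
def pvQ (l : List Int) (k : Nat) : Int := (l.take k).sum

lemma pv_sum_one_le (l : List Int) (hpos : ∀ x ∈ l, 1 ≤ x) (hne : l ≠ []) : 1 ≤ l.sum := by
  induction l with
  | nil => exact absurd rfl hne
  | cons a t ih =>
    have ha : 1 ≤ a := hpos a (by simp)
    rcases eq_or_ne t [] with h | h
    · simp [h]; omega
    · have := ih (fun x hx => hpos x (by simp [hx])) h
      simp only [List.sum_cons]; omega

lemma pv_take_drop_sum (l : List Int) (t m : Nat) :
    ((l.drop t).take m).sum = pvQ l (t + m) - pvQ l t := by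
  have : pvQ l (t + m) = pvQ l t + ((l.drop t).take m).sum := by
    simp [pvQ, List.take_add]
  omega

lemma pv_Q_lt (l : List Int) (hpos : ∀ x ∈ l, 1 ≤ x) {j k : Nat}
    (hjk : j < k) (hk : k ≤ l.length) : pvQ l j < pvQ l k := by
  have hseg : ((l.drop j).take (k - j)).sum = pvQ l k - pvQ l j := by
    have := pv_take_drop_sum l j (k - j)
    rwa [Nat.add_sub_cancel' hjk.le] at this
  have hne : (l.drop j).take (k - j) ≠ [] := by
    have : ((l.drop j).take (k - j)).length = min (k - j) (l.length - j) := by simp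
    intro h
    rw [h] at this
    simp at this
    omega
  have hp : ∀ x ∈ (l.drop j).take (k - j), 1 ≤ x := fun x hx =>
    hpos x (List.mem_of_mem_drop (List.mem_of_mem_take hx))
  have := pv_sum_one_le _ hp hne
  omega

lemma pv_Q_le (l : List Int) (hpos : ∀ x ∈ l, 1 ≤ x) {j k : Nat}
    (hjk : j ≤ k) (hk : k ≤ l.length) : pvQ l j ≤ pvQ l k := by
  rcases eq_or_lt_of_le hjk with h | h
  · subst h; exact le_refl _
  · exact (pv_Q_lt l hpos h hk).le

lemma pv_prefixGo_eq (l : List Int) : ∀ s : Int,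
    pvPrefixGo s l = (List.range l.length).map (fun k => s + (l.take (k + 1)).sum) := by
  induction l with
  | nil => intro s; simp [pvPrefixGo]
  | cons v vs ih =>
    intro s
    rw [pvPrefixGo, ih (s + v)]
    simp only [List.length_cons, List.range_succ_eq_map, List.map_cons, List.map_map]
    rw [List.cons.injEq]
    refine ⟨by simp, ?_⟩
    apply List.map_congr_left
    intro k _
    simp [add_assoc]

lemma pv_pre_eq (l : List Int) :
    0 :: pvPrefixGo 0 l = (List.range (l.length + 1)).map (pvQ l) := by
  rw [pv_prefixGo_eq l 0]
  simp only [List.range_succ_eq_map, List.map_cons, List.map_map]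
  rw [List.cons.injEq]
  refine ⟨by simp [pvQ], ?_⟩
  apply List.map_congr_left
  intro k _
  simp [pvQ]

lemma pv_pre_getD (l : List Int) {k : Nat} (hk : k ≤ l.length) :
    (0 :: pvPrefixGo 0 l).getD k 0 = pvQ l k := by
  rw [pv_pre_eq]
  have hlt : k < ((List.range (l.length + 1)).map (pvQ l)).length := by simp; omega
  rw [List.getD_eq_getElem _ _ hlt]
  simp

lemma pv_pre_nodup (l : List Int) (hpos : ∀ x ∈ l, 1 ≤ x) :
    (0 :: pvPrefixGo 0 l).Nodup := by
  rw [pv_pre_eq]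
  have hpw : ((List.range (l.length + 1)).map (pvQ l)).Pairwise (· < ·) := by
    rw [List.pairwise_map]
    refine List.pairwise_iff_getElem.2 ?_
    intro i j hi hj hij
    simp only [List.getElem_range]
    exact pv_Q_lt l hpos hij (by simpa using Nat.lt_succ_iff.1 (by simpa using hj))
  exact hpw.imp ne_of_lt

-- membership in enumerate (structural helper for the dict characterization)
lemma pv_mem_enumerate {α : Type} (xs : List α) : ∀ (s i : Int) (a : α),
    ((i, a) ∈ PySem.List.enumerate xs s ↔ ∃ k : Nat, k < xs.length ∧ i = s + k ∧ xs[k]? = some a) := by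
  induction xs with
  | nil => intro s i a; simp [PySem.List.enumerate_nil]
  | cons x t ih =>
    intro s i a
    rw [PySem.List.enumerate_cons]
    simp only [List.mem_cons, ih (s + 1)]
    constructor
    · rintro (h | ⟨k, hk, hi, hget⟩)
      · exact ⟨0, by simp, by simp [Prod.ext_iff] at h; simp [h.1], by
          simp [Prod.ext_iff] at h; simp [h.2]⟩
      · exact ⟨k + 1, by simpa using hk, by push_cast; omega, by simpa using hget⟩
    · rintro ⟨k, hk, hi, hget⟩
      cases k with
      | zero => left; simp at hget hi ⊢; exact ⟨hi, hget.symm⟩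
      | succ k' =>
        right
        exact ⟨k', by simpa using hk, by push_cast at hi ⊢; omega, by simpa using hget⟩

lemma pv_idx_items (pre : List Int) (hnd : pre.Nodup) :
    (pvIdx pre).items = (PySem.List.enumerate pre 0).map (fun a => (a.2, a.1)) := by
  have h := PySem.Dict.items_foldl_insert_fresh (l := PySem.List.enumerate pre 0)
      (k := fun a => a.2) (v := fun a => a.1) (d := PySem.Dict.empty)
      (by intro a _; simp [PySem.Dict.contains_empty])
      (by rw [PySem.List.map_snd_enumerate]; exact hnd)
  simpa [pvIdx, PySem.Dict.empty] using h

lemma pv_idx_keys (pre : List Int) (hnd : pre.Nodup) : (pvIdx pre).keys = pre := by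
  have h := pv_idx_items pre hnd
  have : (pvIdx pre).keys = (pvIdx pre).items.map (·.1) := rfl
  rw [this, h, List.map_map]
  have : ((fun p => p.1) ∘ fun (a : Int × Int) => (a.2, a.1)) = fun a => a.2 := rfl
  rw [this, PySem.List.map_snd_enumerate]

lemma pv_idx_get?_some (pre : List Int) (hnd : pre.Nodup) (x j : Int) :
    (pvIdx pre).get? x = some j ↔ ∃ k : Nat, k < pre.length ∧ pre[k]? = some x ∧ j = (k : Int) := by
  have hk : (pvIdx pre).keys.Nodup := by rw [pv_idx_keys pre hnd]; exact hnd
  rw [PySem.Dict.get?_eq_some_iff_mem_items (pvIdx pre) x j hk, pv_idx_items pre hnd]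
  simp only [List.mem_map]
  constructor
  · rintro ⟨⟨i, a⟩, hmem, heq⟩
    simp only [Prod.ext_iff] at heq
    obtain ⟨k, hklen, hi, hget⟩ := (pv_mem_enumerate pre 0 i a).1 hmem
    exact ⟨k, hklen, by rw [hget, heq.1], by rw [← heq.2, hi]; ring⟩
  · rintro ⟨k, hklen, hget, hj⟩
    refine ⟨((k : Int), x), ?_, by rw [hj]⟩
    rw [pv_mem_enumerate]
    exact ⟨k, hklen, by ring, hget⟩

lemma pv_idx_get?_none (pre : List Int) (hnd : pre.Nodup) (x : Int) :
    (pvIdx pre).get? x = none ↔ x ∉ pre := by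
  rw [PySem.Dict.get?_eq_none_iff_not_mem_keys, pv_idx_keys pre hnd]

-- A's inner loop finds the (unique, by positivity) window starting here
lemma pv_aInner_hits (num : Int) : ∀ (s u : List Int) (m : Nat),
    (∀ x ∈ s, 1 ≤ x) → 1 ≤ m → m ≤ s.length → u.sum + (s.take m).sum = num →
    pvAInner num u s = some (u ++ s.take m) := by
  intro s
  induction s with
  | nil => intro u m _ h1 h2 _; simp at h2; omega
  | cons e es ih =>
    intro u m hpos h1 h2 hsum
    rcases Nat.lt_or_ge m 2 with hm | hm
    · have hm1 : m = 1 := by omega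
      subst hm1
      simp only [List.take_succ_cons, List.take_zero] at hsum ⊢
      rw [pvAInner]
      simp only [List.sum_append, List.sum_cons, List.sum_nil] at hsum ⊢
      rw [if_pos (by omega)]
    · obtain ⟨m', rfl⟩ : ∃ m', m = m' + 1 := ⟨m - 1, by omega⟩
      have hm' : 1 ≤ m' := by omega
      have hml : m' ≤ es.length := by simp [List.length_cons] at h2; omega
      have hseg : 1 ≤ (es.take m').sum := by
        refine pv_sum_one_le _ (fun x hx => hpos x (List.mem_cons_of_mem _ (List.mem_of_mem_take hx))) ?_
        intro h
        have := congrArg List.length h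
        simp only [List.length_take, List.length_nil] at this
        omega
      rw [pvAInner]
      simp only [List.take_succ_cons] at hsum ⊢
      rw [if_neg (by simp only [List.sum_append, List.sum_cons, List.sum_nil] at hsum ⊢; omega)]
      rw [ih (u ++ [e]) m' (fun x hx => hpos x (List.mem_cons_of_mem _ hx)) hm' hml
        (by simp only [List.sum_append, List.sum_cons, List.sum_nil] at hsum ⊢; omega)]
      simp

lemma pv_aInner_none (num : Int) : ∀ (s u : List Int),
    (∀ m : Nat, 1 ≤ m → m ≤ s.length → u.sum + (s.take m).sum ≠ num) →
    pvAInner num u s = none := by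
  intro s
  induction s with
  | nil => intro u _; rfl
  | cons e es ih =>
    intro u h
    rw [pvAInner]
    rw [if_neg (by
      have := h 1 (by omega) (by simp)
      simp only [List.take_succ_cons, List.take_zero, List.sum_append, List.sum_cons,
        List.sum_nil] at this ⊢
      omega)]
    apply ih
    intro m hm hml
    have := h (m + 1) (by omega) (by simpa using hml)
    simp only [List.take_succ_cons, List.sum_append, List.sum_cons, List.sum_nil] at this ⊢
    omega

-- A returns [] outright when number ≤ 0 (every window of positives sums to ≥ 1)
lemma pv_aOuter_nonpos (num : Int) (hnum : num ≤ 0) : ∀ s : List Int,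
    (∀ x ∈ s, 1 ≤ x) → pvAOuter num s = [] := by
  intro s
  induction s with
  | nil => intro _; rfl
  | cons e es ih =>
    intro hpos
    rw [pvAOuter]
    rw [pv_aInner_none num (e :: es) []
      (by
        intro m hm hml hsum
        have hne : (e :: es).take m ≠ [] := by
          intro h; have := congrArg List.length h; simp at this; omega
        have := pv_sum_one_le _ (fun x hx => hpos x (List.mem_of_mem_take hx)) hne
        simp only [List.sum_nil] at hsum
        omega)]
    exact ih (fun x hx => hpos x (List.mem_cons_of_mem _ hx))

-- B returns [] outright when number ≤ 0 (a hit index can only be ≤ t; the slice is empty)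
lemma pv_bLoop_nonpos (l : List Int) (hpos : ∀ x ∈ l, 1 ≤ x) (num : Int) (hnum : num ≤ 0) :
    ∀ ts : List Nat, (∀ t ∈ ts, t ≤ l.length) →
    pvBLoop num l (0 :: pvPrefixGo 0 l) (pvIdx (0 :: pvPrefixGo 0 l)) ts = [] := by
  intro ts
  induction ts with
  | nil => intro _; rfl
  | cons t ts ih =>
    intro hts
    have ht : t ≤ l.length := hts t (by simp)
    rw [pvBLoop, pv_pre_getD l ht]
    cases hcase : (pvIdx (0 :: pvPrefixGo 0 l)).get? (pvQ l t + num) with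
    | none => exact ih (fun t' ht' => hts t' (by simp [ht']))
    | some j =>
      obtain ⟨k, hklen, hget, rfl⟩ :=
        (pv_idx_get?_some _ (pv_pre_nodup l hpos) _ j).1 hcase
      have hkn : k ≤ l.length := by
        have := hklen
        rw [pv_pre_eq] at this
        simpa using Nat.lt_succ_iff.1 (by simpa using this)
      have hQk : pvQ l k = pvQ l t + num := by
        rw [pv_pre_eq] at hget
        have hk2 : k < ((List.range (l.length + 1)).map (pvQ l)).length := by
          rw [pv_pre_eq] at hklen; exact hklen
        rw [List.getElem?_eq_getElem hk2] at hget
        simpa using hget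
      have hkt : k ≤ t := by
        by_contra h
        have := pv_Q_lt l hpos (Nat.lt_of_not_le h) hkn
        omega
      show PySem.List.slice l (some (t : Int)) (some ((k : Int))) = []
      rw [PySem.List.slice_natCast]
      have : k - t = 0 := by omega
      rw [this]
      rfl

-- main equivalence for positive number: induction down the suffixes / start indices
lemma pv_main (l : List Int) (hpos : ∀ x ∈ l, 1 ≤ x) (num : Int) (hnum : 1 ≤ num) :
    ∀ (k t : Nat), t + k = l.length →
    pvAOuter num (l.drop t)
      = pvBLoop num l (0 :: pvPrefixGo 0 l) (pvIdx (0 :: pvPrefixGo 0 l)) (List.range' t k) := by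
  intro k
  induction k with
  | zero =>
    intro t ht
    have : t = l.length := by omega
    subst this
    rw [List.drop_length]
    rfl
  | succ k ih =>
    intro t ht
    have htl : t < l.length := by omega
    rw [List.range'_succ, pvBLoop, pv_pre_getD l htl.le]
    have hdrop_len : (l.drop t).length = l.length - t := by simp
    have hdpos : ∀ x ∈ l.drop t, 1 ≤ x := fun x hx => hpos x (List.mem_of_mem_drop hx)
    cases hcase : (pvIdx (0 :: pvPrefixGo 0 l)).get? (pvQ l t + num) with
    | some j =>
      obtain ⟨kk, hklen, hget, rfl⟩ :=
        (pv_idx_get?_some _ (pv_pre_nodup l hpos) _ j).1 hcase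
      have hkn : kk ≤ l.length := by
        rw [pv_pre_eq] at hklen
        simpa using Nat.lt_succ_iff.1 (by simpa using hklen)
      have hQk : pvQ l kk = pvQ l t + num := by
        rw [pv_pre_eq] at hget hklen
        rw [List.getElem?_eq_getElem hklen] at hget
        simpa using hget
      have htk : t < kk := by
        by_contra h
        have := pv_Q_le l hpos (Nat.le_of_not_lt h) htl.le
        omega
      set m := kk - t with hm
      have hm1 : 1 ≤ m := by omega
      have hml : m ≤ (l.drop t).length := by omega
      have hsum : (0 : Int) + ((l.drop t).take m).sum = num := by
        rw [pv_take_drop_sum l t m]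
        have : t + m = kk := by omega
        rw [this]
        omega
      obtain ⟨e, es, hes⟩ : ∃ e es, l.drop t = e :: es := by
        cases hd : l.drop t with
        | nil => rw [hd] at hdrop_len; simp at hdrop_len; omega
        | cons e es => exact ⟨e, es, rfl⟩
      rw [hes, pvAOuter, ← hes]
      rw [pv_aInner_hits num (l.drop t) [] m hdpos hm1 hml (by simpa using hsum)]
      show ([] ++ (l.drop t).take m) = PySem.List.slice l (some (t : Int)) (some ((kk : Int)))
      rw [PySem.List.slice_natCast, List.nil_append, hm]
    | none =>
      have hnotin := (pv_idx_get?_none _ (pv_pre_nodup l hpos) _).1 hcase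
      have hnohit : ∀ m : Nat, 1 ≤ m → m ≤ (l.drop t).length →
          ([] : List Int).sum + ((l.drop t).take m).sum ≠ num := by
        intro m hm hml hsum
        apply hnotin
        rw [pv_pre_eq]
        have htm : t + m ≤ l.length := by omega
        have : pvQ l (t + m) = pvQ l t + num := by
          rw [pv_take_drop_sum l t m] at hsum
          simp only [List.sum_nil, zero_add] at hsum
          omega
        rw [← this]
        exact List.mem_map.2 ⟨t + m, List.mem_range.2 (by omega), rfl⟩
      obtain ⟨e, es, hes⟩ : ∃ e es, l.drop t = e :: es := by
        cases hd : l.drop t with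
        | nil =>
          rw [hd] at hdrop_len; simp at hdrop_len; omega
        | cons e es => exact ⟨e, es, rfl⟩
      rw [hes, pvAOuter, ← hes]
      rw [pv_aInner_none num (l.drop t) [] hnohit]
      have hes' : es = l.drop (t + 1) := by
        have := congrArg List.tail hes
        simpa [List.tail_drop] using this.symm
      show pvAOuter num es
        = pvBLoop num l (0 :: pvPrefixGo 0 l) (pvIdx (0 :: pvPrefixGo 0 l)) (List.range' (t + 1) k)
      rw [hes']
      exact ih (t + 1) (by omega)

-- the two list comprehensions build the same triangular numbers (i ** 2 = i * i)
lemma pv_tri_eq :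
    (PySem.List.pyRange 1 1000 1).map (fun i => PySem.Int.floordiv (i ^ 2 + i) 2) = pvTriB := by
  unfold pvTriB
  apply List.map_congr_left
  intro i _
  rw [sq]

lemma pv_tri_pos : ∀ x ∈ pvTriB, 1 ≤ x := by
  intro x hx
  unfold pvTriB at hx
  obtain ⟨i, hi, rfl⟩ := List.mem_map.1 hx
  rw [PySem.List.mem_pyRange_one] at hi
  rw [PySem.Int.le_floordiv_iff_mul_le (a := i * i + i) (b := 2) (q := 1) (by omega)]
  nlinarith [hi.1]

-- ===== VERDICT (by name: the statement is the Claim_ definition above) =====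
theorem disjoint_spec : Claim_equal_disjoint := by
  intro number _
  unfold Spec_disjoint disjoint disjoint_alt
  rw [pv_tri_eq]
  rcases (by omega : 1 ≤ number ∨ number ≤ 0) with h | h
  · have := pv_main pvTriB pv_tri_pos number h pvTriB.length 0 (by omega)
    simpa [List.range_eq_range'] using this
  · rw [pv_aOuter_nonpos number (by omega) pvTriB pv_tri_pos,
      pv_bLoop_nonpos pvTriB pv_tri_pos number (by omega) (List.range pvTriB.length)
        (fun t ht => (List.mem_range.1 ht).le)]
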